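-- pv_equiv track=rewrite | github.com/priyanshu-21singh/codechef | 0and 1 matrix.py | find_max_ones_row
-- ===== SOURCE A (Python) =====
-- def find_max_ones_row(matrix):
--     max_ones_count = 0
--     max_ones_row = -1
--
--     for i, row in enumerate(matrix):
--         ones_count = row.count(1)
--         if ones_count > max_ones_count:
--             max_ones_count = ones_count
--             max_ones_row = i
--
--     return max_ones_row
-- ===== SOURCE B (Python) =====
-- def find_max_ones_row(matrix):
--     counts = [row.count(1) for row in matrix]
--     if not counts or max(counts) == 0:
--         return -1
--     return counts.index(max(counts))
-- ===== Notes on version B (the rewrite author's own statement) =====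
-- stated objective: simpler
-- what changed: Replaces A's interleaved max-tracking loop over enumerate(matrix) with a build-table-then-argmax decomposition: a per-row count table, then max/index over it, with -1 for empty or all-zero.
import Mathlib
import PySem

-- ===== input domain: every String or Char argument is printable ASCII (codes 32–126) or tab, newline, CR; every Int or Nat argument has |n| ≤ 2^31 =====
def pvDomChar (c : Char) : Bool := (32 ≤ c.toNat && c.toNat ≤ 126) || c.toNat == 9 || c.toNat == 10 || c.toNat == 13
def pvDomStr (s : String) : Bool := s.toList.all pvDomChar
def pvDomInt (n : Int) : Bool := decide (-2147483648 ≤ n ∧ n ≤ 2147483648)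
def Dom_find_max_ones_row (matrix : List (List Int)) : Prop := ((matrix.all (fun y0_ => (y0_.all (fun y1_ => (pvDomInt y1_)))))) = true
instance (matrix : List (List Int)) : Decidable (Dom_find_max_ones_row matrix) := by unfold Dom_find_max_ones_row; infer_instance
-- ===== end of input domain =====

-- B replaces A's interleaved max-tracking loop with a count table followed by a separate max/index argmax pass (simpler decomposition; return value only).

-- ===== PORT A =====
-- A: single loop over enumerate(matrix), tracking (max_ones_count, max_ones_row) with a strict '>' update.
def find_max_ones_row (matrix : List (List Int)) : Int :=
  let st := (PySem.List.enumerate matrix 0).foldl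
    (fun (st : Int × Int) (p : Int × List Int) =>
      let ones_count : Int := (PySem.List.count p.2 1 : Nat)
      if ones_count > st.1 then (ones_count, p.1) else st)
    (0, -1)
  st.2

-- ===== PORT B =====
-- B: counts table, then -1 for empty/all-zero, else first index of the maximum.
-- (counts.index(max) never raises in Python since the max is a member; the none branch is unreachable.)
def find_max_ones_row_alt (matrix : List (List Int)) : Int :=
  let counts : List Int := matrix.map (fun row => ((PySem.List.count row 1 : Nat) : Int))
  match PySem.List.max? counts (fun x => x) with
  | none => -1
  | some m =>
    if m == 0 then -1
    else
      match PySem.List.index? counts m with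
      | some k => (k : Int)
      | none => -1

-- ===== PRECONDITION & SPEC =====
def Spec_find_max_ones_row (matrix : List (List Int)) (out : Int) : Prop := out = find_max_ones_row_alt matrix
instance (matrix : List (List Int)) (out : Int) : Decidable (Spec_find_max_ones_row matrix out) := by unfold Spec_find_max_ones_row; infer_instance

-- ===== CLAIM (what is proved, stated in full; the proofs are below) =====
def Claim_equal_find_max_ones_row : Prop := ∀ (matrix : List (List Int)), Dom_find_max_ones_row matrix → Spec_find_max_ones_row matrix (find_max_ones_row matrix)

-- ===== LEMMAS AND PROOFS =====

-- the step function of A's loop, once the per-row count is abstracted into the enumerated value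
def pvStep (st : Int × Int) (q : Int × Int) : Int × Int :=
  if q.2 > st.1 then (q.2, q.1) else st

-- A's fold over enumerate(matrix) equals the pvStep fold over enumerate(counts)
theorem pv_fold_map (matrix : List (List Int)) (i0 : Int) (st : Int × Int) :
    (PySem.List.enumerate matrix i0).foldl
      (fun (st : Int × Int) (p : Int × List Int) =>
        let ones_count : Int := (PySem.List.count p.2 1 : Nat)
        if ones_count > st.1 then (ones_count, p.1) else st) st
    = (PySem.List.enumerate (matrix.map (fun row => ((PySem.List.count row 1 : Nat) : Int))) i0).foldl pvStep st := by
  induction matrix generalizing i0 st with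
  | nil => rfl
  | cons r t ih =>
    simp only [List.map_cons, PySem.List.enumerate_cons, List.foldl_cons]
    rw [ih]
    rfl

-- if nothing in xs beats the running max, the state never changes
theorem pv_fold_nochange (xs : List Int) (i0 : Int) (c0 r0 : Int)
    (h : ∀ x ∈ xs, x ≤ c0) :
    (PySem.List.enumerate xs i0).foldl pvStep (c0, r0) = (c0, r0) := by
  induction xs generalizing i0 with
  | nil => rfl
  | cons x t ih =>
    have hx : x ≤ c0 := h x (by simp)
    simp only [PySem.List.enumerate_cons, List.foldl_cons, pvStep]
    rw [if_neg (by simp; omega)]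
    exact ih (i0 + 1) (fun y hy => h y (by simp [hy]))

-- through a prefix whose elements are all < m, the running max stays < m
theorem pv_fold_pre (pre : List Int) (i0 : Int) (c0 r0 m : Int)
    (h : ∀ x ∈ pre, x < m) (hc : c0 < m) :
    ∃ c r : Int, (PySem.List.enumerate pre i0).foldl pvStep (c0, r0) = (c, r) ∧ c < m := by
  induction pre generalizing i0 c0 r0 with
  | nil => exact ⟨c0, r0, rfl, hc⟩
  | cons x t ih =>
    simp only [PySem.List.enumerate_cons, List.foldl_cons, pvStep]
    by_cases hx : x > c0
    · rw [if_pos (by simpa using hx)]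
      exact ih (i0 + 1) x i0 (fun y hy => h y (by simp [hy])) (h x (by simp))
    · rw [if_neg (by simpa using hx)]
      exact ih (i0 + 1) c0 r0 (fun y hy => h y (by simp [hy])) hc

-- the core argmax characterisation of A's loop: xs = pre ++ m :: suf with pre all < m, suf all ≤ m
theorem pv_fold_argmax (pre suf : List Int) (m : Int) (i0 c0 r0 : Int)
    (hpre : ∀ x ∈ pre, x < m) (hsuf : ∀ x ∈ suf, x ≤ m) (hc : c0 < m) :
    (PySem.List.enumerate (pre ++ m :: suf) i0).foldl pvStep (c0, r0)
      = (m, i0 + (pre.length : Int)) := by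
  rw [PySem.List.enumerate_append, List.foldl_append]
  obtain ⟨c, r, heq, hlt⟩ := pv_fold_pre pre i0 c0 r0 m hpre hc
  rw [heq]
  simp only [PySem.List.enumerate_cons, List.foldl_cons, pvStep]
  rw [if_pos (by simpa using hlt)]
  exact pv_fold_nochange suf _ _ _ hsuf

-- ===== VERDICT (by name: the statement is the Claim_ definition above) =====
theorem find_max_ones_row_spec : Claim_equal_find_max_ones_row := by
  intro matrix _
  show find_max_ones_row matrix = find_max_ones_row_alt matrix
  unfold find_max_ones_row find_max_ones_row_alt
  rw [pv_fold_map]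
  set counts : List Int := matrix.map (fun row => ((PySem.List.count row 1 : Nat) : Int)) with hcounts
  have hnonneg : ∀ x ∈ counts, 0 ≤ x := by
    intro x hx
    rw [hcounts] at hx
    obtain ⟨row, _, hr⟩ := List.mem_map.mp hx
    omega
  cases hmax : PySem.List.max? counts (fun x => x) with
  | none =>
    have : counts = [] := (PySem.List.max?_eq_none_iff counts _).mp hmax
    rw [this] at hmax
    simp [this, hmax]
  | some m =>
    have hmem : m ∈ counts := PySem.List.max?_mem hmax
    have hmaxle : ∀ y ∈ counts, y ≤ m := by
      intro y hy; exact PySem.List.max?_isMax hmax y hy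
    by_cases hm0 : m = 0
    · -- all counts are 0: A's loop never updates, B returns -1
      have : (PySem.List.enumerate counts 0).foldl pvStep (0, -1) = (0, -1) :=
        pv_fold_nochange counts 0 0 (-1) (fun x hx => by have := hmaxle x hx; omega)
      simp [hmax, hm0, this]
    · have hmpos : 0 < m := lt_of_le_of_ne (hnonneg m hmem) (fun h => hm0 h.symm)
      cases hidx : PySem.List.index? counts m with
      | none =>
        exact absurd hmem ((PySem.List.index?_eq_none_iff counts m).mp hidx)
      | some k =>
        obtain ⟨pre, suf, hdec, hlen, hnotin⟩ :=
          (PySem.List.index?_eq_some_iff counts m k).mp hidx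
        have hpre : ∀ x ∈ pre, x < m := by
          intro x hx
          have hle : x ≤ m := hmaxle x (by rw [hdec]; exact List.mem_append_left _ hx)
          rcases lt_or_eq_of_le hle with h | h
          · exact h
          · exact absurd (h ▸ hx) hnotin
        have hsuf : ∀ x ∈ suf, x ≤ m := by
          intro x hx
          exact hmaxle x (by rw [hdec]; exact List.mem_append_right _ (List.mem_cons_of_mem _ hx))
        simp only [hmax, beq_iff_eq, if_neg hm0, hidx]
        rw [hdec, pv_fold_argmax pre suf m 0 0 (-1) hpre hsuf hmpos]
        simp [hlen]
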